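-- pv_equiv track=rewrite | github.com/PatrickAtYacoub/Jira-ingesting-pipeline | file_processing/pdf_analyzing.py | set_chapter
-- ===== SOURCE A (Python) =====
-- def set_chapter(current_chapter, hierarchy_level, text):
--     """
--     Updates the chapter string based on hierarchy level.
--
--     Args:
--         current_chapter (str): Current chapter structure.
--         hierarchy_level (int): Level of the current heading.
--         text (str): The heading text.
--
--     Returns:
--         str: The updated chapter string.
--     """
--     if not current_chapter:
--         current_chapter = text
--     else:
--         parts = current_chapter.split(";;")
--         # Wenn aktuelle Tiefe existiert → ersetzen
--         if hierarchy_level < len(parts):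
--             parts[hierarchy_level] = text
--             # Alles untergeordnete löschen
--             parts = parts[: hierarchy_level + 1]
--         # Wenn neue Tiefe → anhängen
--         elif hierarchy_level == len(parts):
--             parts.append(text)
--         # Falls Tiefe übersprungen wurde (unüblich), auffüllen mit Dummy
--         else:
--             while len(parts) < hierarchy_level:
--                 parts.append("[UNDEFINED]")
--             parts.append(text)
--
--         current_chapter = ";;".join(parts)
--     return current_chapter
-- ===== SOURCE B (Python) =====
-- def set_chapter(current_chapter, hierarchy_level, text):
--     """Updated chapter string, built in one pass that emits the output string
--     directly: one existing part per level ('[UNDEFINED]' once parts run out),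
--     each followed by ';;', terminated by the new heading text."""
--     if not current_chapter:
--         return text
--     parts = current_chapter.split(";;")
--     out = ""
--     for lvl in range(hierarchy_level):
--         out += (parts[lvl] if lvl < len(parts) else "[UNDEFINED]") + ";;"
--     return out + text
-- ===== Notes on version B (the rewrite author's own statement) =====
-- stated objective: alternative
-- what changed: Replaces A's staged list surgery (three-way branch with index assignment, truncating slice, append and pad-while, then rejoin) by a single recursive descent that builds the result string directly, emitting one existing part per level (defaulting to '[UNDEFINED]' when parts run out) and terminating with the heading text; no truncation, no index assignment, no padding list and no join.
-- outside the precondition, e.g. on set_chapter('a;;b', -1, 'x'): A returns '', B returns 'x'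
import Mathlib
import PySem

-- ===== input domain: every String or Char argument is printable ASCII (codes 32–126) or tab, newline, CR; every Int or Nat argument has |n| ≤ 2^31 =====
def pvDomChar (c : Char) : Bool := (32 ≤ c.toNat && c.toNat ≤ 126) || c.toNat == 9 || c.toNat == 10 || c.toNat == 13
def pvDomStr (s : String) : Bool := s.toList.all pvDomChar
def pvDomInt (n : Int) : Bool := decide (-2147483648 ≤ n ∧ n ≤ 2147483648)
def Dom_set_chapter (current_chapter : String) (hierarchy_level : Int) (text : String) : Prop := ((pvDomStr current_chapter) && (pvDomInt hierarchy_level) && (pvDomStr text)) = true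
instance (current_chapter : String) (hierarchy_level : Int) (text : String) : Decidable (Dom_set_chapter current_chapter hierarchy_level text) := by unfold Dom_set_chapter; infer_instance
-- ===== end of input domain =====

-- B replaces A's staged list surgery (three-way branch: index assignment + truncating
-- slice / append / pad-while, then rejoin) by one pass that emits the result string
-- directly, one part per level (alternative decomposition, same cost).


-- ===== PORT A =====
-- the 'while len(parts) < hierarchy_level: parts.append("[UNDEFINED]")' loop of A
def pvPadLoop (parts : List String) (hl : Int) : List String :=
  if h : (parts.length : Int) < hl then pvPadLoop (parts ++ ["[UNDEFINED]"]) hl else parts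
  termination_by (hl - parts.length).toNat
  decreasing_by simp only [List.length_append, List.length_cons, List.length_nil]; omega

def set_chapter (current_chapter : String) (hierarchy_level : Int) (text : String) : String :=
  if current_chapter = "" then text
  else
    let parts := (PySem.Str.split? current_chapter ";;").getD []
    let parts' :=
      if hierarchy_level < (parts.length : Int) then
        -- parts[hierarchy_level] = text; parts = parts[: hierarchy_level + 1]
        PySem.List.slice (PySem.List.pySetD parts hierarchy_level text) none (some (hierarchy_level + 1))
      else if hierarchy_level = (parts.length : Int) then
        parts ++ [text]
      else
        pvPadLoop parts hierarchy_level ++ [text]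
    PySem.Str.join ";;" parts'

-- ===== PORT B =====
def set_chapter_alt (current_chapter : String) (hierarchy_level : Int) (text : String) : String :=
  if current_chapter = "" then text
  else
    let parts := (PySem.Str.split? current_chapter ";;").getD []
    -- for lvl in range(hierarchy_level): out += (parts[lvl] if lvl < len(parts) else "[UNDEFINED]") + ";;"
    let out := (PySem.List.pyRange 0 hierarchy_level 1).foldl
      (fun out lvl =>
        out ++ ((if lvl < (parts.length : Int) then PySem.List.pyGetD parts lvl "" else "[UNDEFINED]") ++ ";;")) ""
    out ++ text

-- ===== PRECONDITION & SPEC =====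
-- Pre_ restricts to the natural domain of nonnegative hierarchy levels (the level is
-- ignored when current_chapter is empty): on a nonempty chapter with a negative level A
-- either raises IndexError (level < -depth) or returns a value produced by accidental
-- negative-index wraparound and negative-slice truncation, which B does not mimic.
def Pre_set_chapter (current_chapter : String) (hierarchy_level : Int) (text : String) : Prop :=
  current_chapter = "" ∨ 0 ≤ hierarchy_level
instance (current_chapter : String) (hierarchy_level : Int) (text : String) : Decidable (Pre_set_chapter current_chapter hierarchy_level text) := by unfold Pre_set_chapter; infer_instance
def pvWitness_set_chapter : String × Int × String := ("Intro;;Basics", 1, "Advanced")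

def Spec_set_chapter (current_chapter : String) (hierarchy_level : Int) (text : String) (out : String) : Prop := out = set_chapter_alt current_chapter hierarchy_level text
instance (current_chapter : String) (hierarchy_level : Int) (text : String) (out : String) : Decidable (Spec_set_chapter current_chapter hierarchy_level text out) := by unfold Spec_set_chapter; infer_instance

-- ===== CLAIM (what is proved, stated in full; the proofs are below) =====
def Claim_equal_set_chapter : Prop := ∀ (current_chapter : String) (hierarchy_level : Int) (text : String), Dom_set_chapter current_chapter hierarchy_level text → Pre_set_chapter current_chapter hierarchy_level text → Spec_set_chapter current_chapter hierarchy_level text (set_chapter current_chapter hierarchy_level text)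

-- ===== LEMMAS AND PROOFS =====
lemma pvPadLoop_eq (parts : List String) (hl : Int) :
    pvPadLoop parts hl = parts ++ List.replicate (hl - parts.length).toNat "[UNDEFINED]" := by
  induction parts using pvPadLoop.induct (hl := hl) with
  | case1 parts h ih =>
      rw [pvPadLoop, dif_pos h, ih]
      have hk : (hl - parts.length).toNat = (hl - ((parts ++ ["[UNDEFINED]"]).length : Int)).toNat + 1 := by
        simp only [List.length_append, List.length_cons, List.length_nil]; omega
      rw [hk, List.replicate_succ]
      simp
  | case2 parts h =>
      rw [pvPadLoop, dif_neg h]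
      have : (hl - parts.length).toNat = 0 := by omega
      simp [this]

-- the branch bodies of A and the canonical take/pad/append list agree, for n ≥ 0
lemma pvCore (parts : List String) (text : String) (n : Nat) :
    (if (n : Int) < (parts.length : Int) then
        PySem.List.slice (PySem.List.pySetD parts (n : Int) text) none (some ((n : Int) + 1))
      else if (n : Int) = (parts.length : Int) then parts ++ [text]
      else pvPadLoop parts (n : Int) ++ [text])
    = (PySem.List.slice parts none (some (n : Int)) ++
        List.replicate ((n : Int) - ((PySem.List.slice parts none (some (n : Int))).length : Int)).toNat "[UNDEFINED]") ++ [text] := by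
  rw [PySem.List.slice_to_natCast]
  by_cases h1 : n < parts.length
  · rw [if_pos (by exact_mod_cast h1)]
    have hb : ((n : Int) + 1) = ((n + 1 : Nat) : Int) := by push_cast; ring
    rw [hb, PySem.List.pySetD_natCast, PySem.List.slice_to_natCast]
    have hlen : (parts.take n).length = n := by simp; omega
    have hrep : ((n : Int) - ((parts.take n).length : Int)).toNat = 0 := by rw [hlen]; omega
    rw [hrep]
    have : (parts.set n text).take (n + 1) = parts.take n ++ [text] := by
      rw [List.set_eq_take_cons_drop _ h1, show n + 1 = (parts.take n).length + 1 from by omega,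
        List.take_append]
      simp
    simp [this]
  · rw [if_neg (by exact_mod_cast h1)]
    have htake : parts.take n = parts := List.take_of_length_le (by omega)
    by_cases h2 : n = parts.length
    · rw [if_pos (by exact_mod_cast h2)]
      rw [htake]
      have : ((n : Int) - (parts.length : Int)).toNat = 0 := by omega
      simp [this]
    · rw [if_neg (by exact_mod_cast h2), pvPadLoop_eq, htake]

-- sep.join(x :: l) for nonempty l
lemma pvJoin_cons (sep x : String) (l : List String) (h : l ≠ []) :
    PySem.Str.join sep (x :: l) = x ++ sep ++ PySem.Str.join sep l := by
  apply String.toList_inj.mp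
  cases l with
  | nil => exact absurd rfl h
  | cons y t =>
      simp [PySem.Str.toList_join, PySem.Chars.join_cons_cons, String.toList_append]

-- hoisting the accumulator out of B's emitting fold
lemma pvFoldl_acc (l : List String) (acc : String) :
    l.foldl (fun a p => a ++ (p ++ ";;")) acc
      = acc ++ l.foldl (fun a p => a ++ (p ++ ";;")) "" := by
  induction l generalizing acc with
  | nil => simp [String.append_empty]
  | cons x l ih =>
      simp only [List.foldl_cons]
      rw [ih (acc ++ (x ++ ";;")), ih ("" ++ (x ++ ";;"))]
      simp [String.empty_append, String.append_assoc]

-- ';;'.join(l + [t]) is B's emitting fold over l followed by t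
lemma pvJoin_fold (l : List String) (t : String) :
    PySem.Str.join ";;" (l ++ [t]) = l.foldl (fun a p => a ++ (p ++ ";;")) "" ++ t := by
  induction l with
  | nil =>
      apply String.toList_inj.mp
      simp [PySem.Str.toList_join, PySem.Chars.join_singleton]
  | cons x l ih =>
      rw [List.cons_append, pvJoin_cons ";;" x _ (by simp), ih]
      simp only [List.foldl_cons]
      rw [pvFoldl_acc l ("" ++ (x ++ ";;"))]
      simp [String.empty_append, String.append_assoc]

-- the per-level pieces B emits are exactly the canonical take/pad list
lemma pvPieces (parts : List String) (n : Nat) :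
    (PySem.List.pyRange 0 (n : Int) 1).map
        (fun lvl => if lvl < (parts.length : Int) then PySem.List.pyGetD parts lvl "" else "[UNDEFINED]")
      = parts.take n ++ List.replicate (n - (parts.take n).length) "[UNDEFINED]" := by
  induction n with
  | zero => simp [PySem.List.pyRange_one_eq_nil]
  | succ n ih =>
      rw [show ((n + 1 : Nat) : Int) = (n : Int) + 1 from by push_cast; ring,
        PySem.List.pyRange_one_succ_right (by omega : (0 : Int) ≤ (n : Int)), List.map_append, ih]
      simp only [List.map_cons, List.map_nil]
      by_cases h : n < parts.length
      · rw [if_pos (by exact_mod_cast h), PySem.List.pyGetD_natCast]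
        have hlen : (parts.take n).length = n := by simp; omega
        have hlen' : (parts.take (n + 1)).length = n + 1 := by simp; omega
        rw [hlen, hlen', Nat.sub_self, Nat.sub_self, List.replicate_zero,
          List.append_nil, List.append_nil, List.take_add_one]
        have : parts[n]? = some parts[n] := List.getElem?_eq_getElem h
        simp [this, List.getD]
      · rw [if_neg (by exact_mod_cast h)]
        have htake : parts.take n = parts := List.take_of_length_le (by omega)
        have htake' : parts.take (n + 1) = parts := List.take_of_length_le (by omega)
        rw [htake, htake', List.append_assoc, ← List.replicate_succ' ]
        have : n - parts.length + 1 = n + 1 - parts.length := by omega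
        rw [this]

-- ===== VERDICT (by name: the statement is the Claim_ definition above) =====
theorem set_chapter_spec : Claim_equal_set_chapter := by
  intro cc hl text _ hpre
  unfold Spec_set_chapter set_chapter set_chapter_alt
  by_cases hcc : cc = ""
  · simp [hcc]
  · have h0 : 0 ≤ hl := hpre.resolve_left hcc
    rw [if_neg hcc, if_neg hcc]
    obtain ⟨n, rfl⟩ : ∃ n : Nat, hl = (n : Int) := ⟨hl.toNat, (Int.toNat_of_nonneg h0).symm⟩
    have hnat : ((n : Int) - ((((PySem.Str.split? cc ";;").getD []).take n).length : Int)).toNat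
        = n - ((((PySem.Str.split? cc ";;").getD []).take n).length) := by omega
    have hfold : (((PySem.List.pyRange 0 (n : Int) 1).map
          (fun lvl => if lvl < ((((PySem.Str.split? cc ";;").getD []).length : Nat) : Int)
            then PySem.List.pyGetD ((PySem.Str.split? cc ";;").getD []) lvl "" else "[UNDEFINED]")).foldl
          (fun a p => a ++ (p ++ ";;")) "")
        = (PySem.List.pyRange 0 (n : Int) 1).foldl
          (fun out lvl =>
            out ++ ((if lvl < ((((PySem.Str.split? cc ";;").getD []).length : Nat) : Int)
              then PySem.List.pyGetD ((PySem.Str.split? cc ";;").getD []) lvl "" else "[UNDEFINED]") ++ ";;")) "" := by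
      rw [List.foldl_map]
    have key : PySem.Str.join ";;"
        ((PySem.List.slice ((PySem.Str.split? cc ";;").getD []) none (some (n : Int)) ++
          List.replicate ((n : Int) - ((PySem.List.slice ((PySem.Str.split? cc ";;").getD []) none (some (n : Int))).length : Int)).toNat "[UNDEFINED]") ++ [text])
        = (PySem.List.pyRange 0 (n : Int) 1).foldl
          (fun out lvl =>
            out ++ ((if lvl < ((((PySem.Str.split? cc ";;").getD []).length : Nat) : Int)
              then PySem.List.pyGetD ((PySem.Str.split? cc ";;").getD []) lvl "" else "[UNDEFINED]") ++ ";;")) "" ++ text := by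
      rw [PySem.List.slice_to_natCast, hnat, pvJoin_fold, ← pvPieces, hfold]
    exact (congrArg (PySem.Str.join ";;") (pvCore _ text n)).trans key
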